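-- pv_equiv track=rewrite | github.com/nileshmatre1995/Nilesh | Flentas_test.py | calcuate_min_cost
-- ===== SOURCE A (Python) =====
-- def calcuate_min_cost(number_of_villagers, cost):
--     total_cost = 0
--     cost.sort()
--     for i in range(0, number_of_villagers - 1):
--         if cost is not None:
--             total_cost += max(cost)
--             if i < (number_of_villagers - 2):
--                 total_cost += min(cost)
--             cost = cost[:-1]
--     return total_cost
-- ===== SOURCE B (Python) =====
-- def calcuate_min_cost(number_of_villagers, cost):
--     if number_of_villagers <= 1:
--         return 0
--     s = sorted(cost)
--     k = number_of_villagers - 1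
--     return sum(s[len(s) - k:]) + (number_of_villagers - 2) * s[0]
-- ===== Notes on version B (the rewrite author's own statement) =====
-- stated objective: faster
-- what changed: Replaces the O(n^2) peel loop (recomputing max/min and reslicing each iteration) with one sort plus a closed form: sum of the top n-1 sorted costs plus (n-2) times the minimum.
import Mathlib
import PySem

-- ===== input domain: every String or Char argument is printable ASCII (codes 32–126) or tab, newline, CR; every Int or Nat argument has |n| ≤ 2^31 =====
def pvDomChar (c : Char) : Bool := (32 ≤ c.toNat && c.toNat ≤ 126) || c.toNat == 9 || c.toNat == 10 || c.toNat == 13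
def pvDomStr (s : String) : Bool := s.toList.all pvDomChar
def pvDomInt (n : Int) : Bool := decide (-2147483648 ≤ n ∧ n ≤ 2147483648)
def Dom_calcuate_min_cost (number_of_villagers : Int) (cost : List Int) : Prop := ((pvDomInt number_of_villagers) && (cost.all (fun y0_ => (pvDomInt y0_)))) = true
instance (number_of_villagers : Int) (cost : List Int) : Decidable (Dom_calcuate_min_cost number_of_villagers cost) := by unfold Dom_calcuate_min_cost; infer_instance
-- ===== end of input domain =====

-- B replaces A's quadratic peel loop by one sort plus a closed form; equivalence is about the
-- RETURN value only: Python A sorts its `cost` argument in place, B leaves it untouched.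

-- ===== PORT A =====
def calcuate_min_cost (number_of_villagers : Int) (cost : List Int) : Int :=
  let sortedCost := PySem.List.sorted cost (fun x => x) false
  -- `if cost is not None` is always true for a list argument, so the body runs unconditionally
  (((PySem.List.pyRange 0 (number_of_villagers - 1) 1).foldl
      (fun (st : Int × List Int) i =>
        let t := st.1 + (PySem.List.max? st.2 (fun y => y)).getD 0
        let t := if i < number_of_villagers - 2 then t + (PySem.List.min? st.2 (fun y => y)).getD 0 else t
        (t, PySem.List.slice st.2 none (some (-1))))
      (0, sortedCost))).1

-- ===== PORT B =====
def calcuate_min_cost_alt (number_of_villagers : Int) (cost : List Int) : Int :=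
  if number_of_villagers ≤ 1 then 0
  else
    let s := PySem.List.sorted cost (fun x => x) false
    let k := number_of_villagers - 1
    (PySem.List.slice s (some ((s.length : Int) - k)) none).foldl (· + ·) 0
      + (number_of_villagers - 2) * (PySem.List.pyGet? s 0).getD 0

-- ===== PRECONDITION & SPEC =====
-- Pre_ excludes exactly the inputs where Python A raises ValueError: more than len(cost)+1
-- villagers make max()/min() hit an empty list.
def Pre_calcuate_min_cost (number_of_villagers : Int) (cost : List Int) : Prop :=
  number_of_villagers - 1 ≤ (cost.length : Int)
instance (number_of_villagers : Int) (cost : List Int) : Decidable (Pre_calcuate_min_cost number_of_villagers cost) := by unfold Pre_calcuate_min_cost; infer_instance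

def pvWitness_calcuate_min_cost : Int × List Int := (3, [4, 1, 7])

def Spec_calcuate_min_cost (number_of_villagers : Int) (cost : List Int) (out : Int) : Prop := out = calcuate_min_cost_alt number_of_villagers cost
instance (number_of_villagers : Int) (cost : List Int) (out : Int) : Decidable (Spec_calcuate_min_cost number_of_villagers cost out) := by unfold Spec_calcuate_min_cost; infer_instance

-- ===== CLAIM (what is proved, stated in full; the proofs are below) =====
def Claim_equal_calcuate_min_cost : Prop := ∀ (number_of_villagers : Int) (cost : List Int), Dom_calcuate_min_cost number_of_villagers cost → Pre_calcuate_min_cost number_of_villagers cost → Spec_calcuate_min_cost number_of_villagers cost (calcuate_min_cost number_of_villagers cost)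

-- ===== LEMMAS AND PROOFS =====

-- in a (· ≤ ·)-sorted list, every member is ≤ the last element
lemma pv_mem_le_getLast (s : List Int) (hs : s.Pairwise (· ≤ ·)) :
    ∀ x ∈ s, ∀ (hne : s ≠ []), x ≤ s.getLast hne := by
  induction s with
  | nil => intro x hx; cases hx
  | cons a t ih =>
    intro x hx hne
    rcases List.mem_cons.mp hx with rfl | hx
    · cases t with
      | nil => simp [List.getLast]
      | cons b u =>
        have hmem : (b :: u).getLast (by simp) ∈ b :: u := List.getLast_mem _
        have := (List.pairwise_cons.mp hs).1 _ hmem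
        simpa [List.getLast] using this
    · cases t with
      | nil => cases hx
      | cons b u =>
        have := ih (List.pairwise_cons.mp hs).2 x hx (by simp)
        simpa [List.getLast] using this

-- in a (· ≤ ·)-sorted list, the head is ≤ every member
lemma pv_head_le_mem (a : Int) (t : List Int) (hs : (a :: t).Pairwise (· ≤ ·)) (x : Int)
    (hx : x ∈ a :: t) : a ≤ x := by
  rcases List.mem_cons.mp hx with rfl | hx
  · exact le_refl _
  · exact (List.pairwise_cons.mp hs).1 x hx

-- Python max of a sorted nonempty list is its last element
lemma pv_max_sorted (s : List Int) (hs : s.Pairwise (· ≤ ·)) (hne : s ≠ []) :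
    (PySem.List.max? s (fun y => y)).getD 0 = s.getLast hne := by
  rcases h : PySem.List.max? s (fun y => y) with _ | m
  · exact absurd ((PySem.List.max?_eq_none_iff _ _).mp h) hne
  · have hm : m ∈ s := PySem.List.max?_mem h
    have h1 : s.getLast hne ≤ m := PySem.List.max?_isMax h _ (List.getLast_mem hne)
    have h2 : m ≤ s.getLast hne := pv_mem_le_getLast s hs m hm hne
    simpa using le_antisymm h2 h1

-- Python min of a sorted nonempty list is its head
lemma pv_min_sorted (s : List Int) (hs : s.Pairwise (· ≤ ·)) (hne : s ≠ []) :
    (PySem.List.min? s (fun y => y)).getD 0 = s.headI := by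
  cases s with
  | nil => exact absurd rfl hne
  | cons a t =>
    rcases h : PySem.List.min? (a :: t) (fun y => y) with _ | m
    · exact absurd ((PySem.List.min?_eq_none_iff _ _).mp h) (by simp)
    · have hm : m ∈ a :: t := PySem.List.min?_mem h
      have h1 : m ≤ a := PySem.List.min?_isMin h _ List.mem_cons_self
      have h2 : a ≤ m := pv_head_le_mem a t hs m hm
      simpa using le_antisymm h1 h2

-- A's loop on a sorted list: peeling k elements adds the last k elements plus (k-1) heads
lemma pv_loop (b : Int) : ∀ (k : Nat) (s : List Int) (t : Int),
    s.Pairwise (· ≤ ·) → k ≤ s.length →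
    ((PySem.List.pyRange (b - k) b 1).foldl
      (fun (st : Int × List Int) i =>
        let t := st.1 + (PySem.List.max? st.2 (fun y => y)).getD 0
        let t := if i < b - 1 then t + (PySem.List.min? st.2 (fun y => y)).getD 0 else t
        (t, PySem.List.slice st.2 none (some (-1))))
      (t, s)).1
    = t + (s.drop (s.length - k)).foldl (· + ·) 0 + ((k - 1 : Nat) : Int) * s.headI := by
  intro k
  induction k with
  | zero =>
    intro s t hs hk
    rw [show b - ((0:Nat):Int) = b by simp, PySem.List.pyRange_one_eq_nil le_rfl]
    simp
  | succ k ih =>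
    intro s t hs hk
    have hne : s ≠ [] := by intro h; subst h; simp at hk
    have hlen : s.dropLast.length = s.length - 1 := List.length_dropLast
    have hcons : PySem.List.pyRange (b - ((k+1:Nat):Int)) b
        = (b - ((k+1:Nat):Int)) :: PySem.List.pyRange (b - (k:Nat)) b := by
      rw [PySem.List.pyRange_one_cons (by push_cast; omega)]
      congr 2
      push_cast; ring
    rw [hcons, List.foldl_cons]
    have hstep :
        (let t1 := (t, s).1 + (PySem.List.max? (t, s).2 (fun y => y)).getD 0
         let t2 := if b - ((k+1:Nat):Int) < b - 1
           then t1 + (PySem.List.min? (t, s).2 (fun y => y)).getD 0 else t1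
         (t2, PySem.List.slice (t, s).2 none (some (-1))))
        = (t + s.getLast hne + (if (b - ((k+1:Nat):Int)) < b - 1 then s.headI else 0),
           s.dropLast) := by
      simp only [pv_max_sorted s hs hne, pv_min_sorted s hs hne, PySem.List.slice_to_neg_one]
      split_ifs <;> simp
    rw [hstep]
    have hs' : s.dropLast.Pairwise (· ≤ ·) := List.Pairwise.sublist (List.dropLast_sublist s) hs
    have hk' : k ≤ s.dropLast.length := by omega
    rw [ih s.dropLast _ hs' hk']
    have hsum : (s.drop (s.length - (k+1))).foldl (· + ·) 0
        = (s.dropLast.drop (s.dropLast.length - k)).foldl (· + ·) 0 + s.getLast hne := by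
      conv_lhs => rw [← List.dropLast_append_getLast hne]
      rw [show (s.dropLast ++ [s.getLast hne]).length - (k+1) = s.dropLast.length - k by
            simp only [List.length_append, List.length_singleton]; omega,
          List.drop_append_of_le_length (by omega), List.foldl_append]
      simp
    rw [hsum]
    rcases Nat.eq_zero_or_pos k with rfl | hkpos
    · rw [if_neg (by push_cast; omega)]
      simp
      ring
    · rw [if_pos (by push_cast; omega)]
      have hhead : s.dropLast.headI = s.headI := by
        cases s with
        | nil => rfl
        | cons a ts =>
          cases ts with
          | nil => simp at hk; omega
          | cons c u => simp
      rw [hhead]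
      have h1 : ((k - 1 : Nat) : Int) = (k : Int) - 1 := by omega
      have h2 : ((k + 1 - 1 : Nat) : Int) = (k : Int) := by omega
      rw [h1, h2]
      ring

-- ===== VERDICT (by name: the statement is the Claim_ definition above) =====
theorem calcuate_min_cost_spec : Claim_equal_calcuate_min_cost := by
  intro n cost _ hpre
  have hpre' : n - 1 ≤ (cost.length : Int) := hpre
  unfold Spec_calcuate_min_cost
  simp only [calcuate_min_cost, calcuate_min_cost_alt]
  by_cases hn : n ≤ 1
  · rw [if_pos hn, PySem.List.pyRange_one_eq_nil (by omega)]
    simp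
  · rw [if_neg hn]
    rw [show n - 2 = n - 1 - 1 from by ring]
    set s := PySem.List.sorted cost (fun x => x) false with hsdef
    have hs : s.Pairwise (· ≤ ·) := PySem.List.sorted_pairwise cost (fun x => x)
    have hlen : s.length = cost.length := PySem.List.length_sorted cost (fun x => x) false
    set k := (n - 1).toNat with hkdef
    have hk1 : 1 ≤ k := by omega
    have hk : k ≤ s.length := by omega
    have hne : s ≠ [] := by
      intro h
      rw [h] at hk
      simp at hk
      omega
    have hloop := pv_loop (n - 1) k s 0 hs hk
    rw [show n - 1 - ((k : Nat) : Int) = 0 from by omega] at hloop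
    rw [hloop]
    rw [show (s.length : Int) - (n - 1) = ((s.length - k : Nat) : Int) from by omega,
        PySem.List.slice_from_natCast]
    obtain ⟨a, ts, hcons2⟩ := List.exists_cons_of_ne_nil hne
    have h2 : (PySem.List.pyGet? s 0).getD 0 = s.headI := by
      rw [hcons2]
      simp
    have h3 : ((k - 1 : Nat) : Int) = n - 1 - 1 := by omega
    rw [h2, h3]
    ring
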